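-- pv_equiv track=rewrite | github.com/garrett361/mamba | mamba_ssm/modules/mamba2_cp.py | _get_seq_to_zigzag_minishard_maps
-- ===== SOURCE A (Python) =====
-- def _get_seq_to_zigzag_minishard_maps(
--     group_size: int,
-- ) -> tuple[dict[int, int], dict[int, int]]:
--     minishard_list = list(range(2 * group_size))
--     minishard_list[::2], minishard_list[1::2] = (
--         minishard_list[:group_size],
--         minishard_list[: group_size - 1 : -1],
--     )
--     seq_to_zigzag_map = {seq: zigzag for seq, zigzag in enumerate(minishard_list)}
--     zigzag_to_seq_map = {zigzag: seq for seq, zigzag in seq_to_zigzag_map.items()}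
--     return seq_to_zigzag_map, zigzag_to_seq_map
-- ===== SOURCE B (Python) =====
-- def _get_seq_to_zigzag_minishard_maps(
--     group_size: int,
-- ) -> tuple[dict[int, int], dict[int, int]]:
--     seq_to_zigzag_map = {}
--     zigzag_to_seq_map = {}
--     for i in range(group_size):
--         lo = i
--         hi = 2 * group_size - 1 - i
--         seq_to_zigzag_map[2 * i] = lo
--         seq_to_zigzag_map[2 * i + 1] = hi
--         zigzag_to_seq_map[lo] = 2 * i
--         zigzag_to_seq_map[hi] = 2 * i + 1
--     return seq_to_zigzag_map, zigzag_to_seq_map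
-- ===== Notes on version B (the rewrite author's own statement) =====
-- stated objective: simpler
-- what changed: Replaced the intermediate list built by stride-2 slice assignment plus a separate enumerate-then-invert pass with a single loop over i in range(group_size) that writes both dictionary entries of each zigzag pair (i and 2*group_size-1-i) and their inverses directly from the closed form.
import Mathlib
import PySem

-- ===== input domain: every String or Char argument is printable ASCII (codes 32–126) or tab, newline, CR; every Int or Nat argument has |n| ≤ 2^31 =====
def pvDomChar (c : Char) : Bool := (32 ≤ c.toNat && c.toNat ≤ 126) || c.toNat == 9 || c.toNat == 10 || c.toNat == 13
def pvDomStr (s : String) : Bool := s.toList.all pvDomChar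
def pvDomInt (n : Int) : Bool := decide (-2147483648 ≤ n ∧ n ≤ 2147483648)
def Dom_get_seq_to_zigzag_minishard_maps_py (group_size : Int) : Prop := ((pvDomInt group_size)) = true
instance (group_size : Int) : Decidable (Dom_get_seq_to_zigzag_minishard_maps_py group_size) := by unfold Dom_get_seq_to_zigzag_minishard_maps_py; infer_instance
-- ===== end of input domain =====

-- B replaces A's stride-2 slice assignment + enumerate + inversion pass by one loop writing both
-- maps and their inverses from the closed form of each zigzag pair (objective: simpler).

-- ===== PORT A =====
-- Python's simultaneous slice assignment `l[::2], l[1::2] = l[:g], l[:g-1:-1]` evaluates both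
-- right-hand slices of the original list first, then interleaves them into the even/odd
-- positions (the lengths always match here: g, g and 2*g).
def pvInterleave : List Int → List Int → List Int
  | [], os => os
  | e :: es, [] => e :: es
  | e :: es, o :: os => e :: o :: pvInterleave es os

def get_seq_to_zigzag_minishard_maps_py (group_size : Int) : (List (Int × Int)) × (List (Int × Int)) :=
  let ms0 := PySem.List.pyRange 0 (2 * group_size) 1
  let evens := PySem.List.slice ms0 none (some group_size)
  -- ms0[:group_size-1:-1]; step -1 is never invalid, so the slice always yields a list
  let odds := (PySem.List.slice? ms0 none (some (group_size - 1)) (-1)).getD []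
  let minishard_list := pvInterleave evens odds
  -- {seq: zigzag for seq, zigzag in enumerate(minishard_list)}
  let seq_to_zigzag := (PySem.List.enumerate minishard_list 0).foldl
      (fun (d : PySem.Dict Int Int) p => d.insert p.1 p.2) (PySem.Dict.mk [])
  -- {zigzag: seq for seq, zigzag in seq_to_zigzag_map.items()}
  let zigzag_to_seq := seq_to_zigzag.items.foldl
      (fun (d : PySem.Dict Int Int) p => d.insert p.2 p.1) (PySem.Dict.mk [])
  (seq_to_zigzag.items, zigzag_to_seq.items)

-- ===== PORT B =====
def get_seq_to_zigzag_minishard_maps_py_alt (group_size : Int) : (List (Int × Int)) × (List (Int × Int)) :=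
  let r := (PySem.List.pyRange 0 group_size 1).foldl
    (fun (acc : PySem.Dict Int Int × PySem.Dict Int Int) i =>
      let lo := i
      let hi := 2 * group_size - 1 - i
      ((acc.1.insert (2 * i) lo).insert (2 * i + 1) hi,
       (acc.2.insert lo (2 * i)).insert hi (2 * i + 1)))
    (PySem.Dict.mk [], PySem.Dict.mk [])
  (r.1.items, r.2.items)

-- ===== PRECONDITION & SPEC =====
def Spec_get_seq_to_zigzag_minishard_maps_py (group_size : Int) (out : (List (Int × Int)) × (List (Int × Int))) : Prop := out = get_seq_to_zigzag_minishard_maps_py_alt group_size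
instance (group_size : Int) (out : (List (Int × Int)) × (List (Int × Int))) : Decidable (Spec_get_seq_to_zigzag_minishard_maps_py group_size out) := by unfold Spec_get_seq_to_zigzag_minishard_maps_py; infer_instance

-- ===== CLAIM (what is proved, stated in full; the proofs are below) =====
def Claim_equal_get_seq_to_zigzag_minishard_maps_py : Prop := ∀ (group_size : Int), Dom_get_seq_to_zigzag_minishard_maps_py group_size → Spec_get_seq_to_zigzag_minishard_maps_py group_size (get_seq_to_zigzag_minishard_maps_py group_size)

-- ===== LEMMAS AND PROOFS =====

-- the items of the seq→zigzag map after processing the first k pairs, for group size g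
def pvS (g : Int) (k : Nat) : List (Int × Int) :=
  (List.range k).flatMap (fun (i : Nat) => [((2 * (i : Int)), (i : Int)), (2 * (i : Int) + 1, 2 * g - 1 - (i : Int))])

-- the items of the zigzag→seq map after processing the first k pairs
def pvT (g : Int) (k : Nat) : List (Int × Int) :=
  (List.range k).flatMap (fun (i : Nat) => [(((i : Int)), 2 * (i : Int)), (2 * g - 1 - (i : Int), 2 * (i : Int) + 1)])

-- the zigzag minishard list itself (A's `minishard_list`)
def pvM (g : Int) (k : Nat) : List Int :=
  (List.range k).flatMap (fun (i : Nat) => [((i : Int)), 2 * g - 1 - (i : Int)])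

theorem pvDict_eq {l : List (Int × Int)} {d : PySem.Dict Int Int}
    (h : d.items = l) : d = PySem.Dict.mk l := by
  cases d; cases h; rfl

theorem pvS_succ (g : Int) (k : Nat) :
    pvS g (k + 1) = pvS g k ++ [((2 * (k : Int)), (k : Int)), (2 * (k : Int) + 1, 2 * g - 1 - (k : Int))] := by
  simp [pvS, List.range_succ]

theorem pvT_succ (g : Int) (k : Nat) :
    pvT g (k + 1) = pvT g k ++ [(((k : Int)), 2 * (k : Int)), (2 * g - 1 - (k : Int), 2 * (k : Int) + 1)] := by
  simp [pvT, List.range_succ]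

theorem pvM_succ (g : Int) (k : Nat) :
    pvM g (k + 1) = pvM g k ++ [((k : Int)), 2 * g - 1 - (k : Int)] := by
  simp [pvM, List.range_succ]

theorem fst_pvS (g : Int) (k : Nat) :
    (pvS g k).map Prod.fst = PySem.List.pyRange 0 (2 * (k : Int)) 1 := by
  induction k with
  | zero => simp [pvS, PySem.List.pyRange_one_eq_nil]
  | succ k ih =>
      have h1 : (0 : Int) ≤ 2 * (k : Int) := by positivity
      have e1 : (2 * ((k : Int) + 1)) = (2 * (k : Int) + 1) + 1 := by ring
      rw [pvS_succ, List.map_append, ih]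
      push_cast
      rw [e1, PySem.List.pyRange_one_succ_right (by omega),
          PySem.List.pyRange_one_succ_right h1]
      simp

theorem mem_fst_pvT (g : Int) (k : Nat) (x : Int) :
    x ∈ (pvT g k).map Prod.fst ↔ ∃ i : Nat, i < k ∧ (x = (i : Int) ∨ x = 2 * g - 1 - (i : Int)) := by
  rw [List.mem_map]
  constructor
  · rintro ⟨p, hp, rfl⟩
    rw [pvT, List.mem_flatMap] at hp
    obtain ⟨i, hi, hpi⟩ := hp
    rw [List.mem_range] at hi
    rcases (by simpa using hpi :
        p = (((i : Int)), 2 * (i : Int)) ∨ p = (2 * g - 1 - (i : Int), 2 * (i : Int) + 1)) with h | h <;>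
      (subst h; exact ⟨i, hi, by simp⟩)
  · rintro ⟨i, hi, hx⟩
    rcases hx with rfl | rfl
    · exact ⟨(((i : Int)), 2 * (i : Int)),
        by rw [pvT, List.mem_flatMap]; exact ⟨i, by simp [hi], by simp⟩, rfl⟩
    · exact ⟨(2 * g - 1 - (i : Int), 2 * (i : Int) + 1),
        by rw [pvT, List.mem_flatMap]; exact ⟨i, by simp [hi], by simp⟩, rfl⟩

theorem nodup_fst_pvT (g : Int) (k : Nat) (hk : (k : Int) ≤ g) :
    ((pvT g k).map Prod.fst).Nodup := by
  induction k with
  | zero => simp [pvT]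
  | succ k ih =>
      rw [pvT_succ, List.map_append, List.nodup_append]
      refine ⟨ih (by omega), by simp; omega, ?_⟩
      intro x hx y hy
      rw [mem_fst_pvT] at hx
      obtain ⟨i, hi, hxe⟩ := hx
      have hy' : y = (k : Int) ∨ y = 2 * g - 1 - (k : Int) := by simpa using hy
      have hik : (i : Int) < (k : Int) := by exact_mod_cast hi
      omega

-- folding dict-inserts over a pair list with fresh, pairwise-distinct keys appends the pairs
theorem pvFoldInsert (l : List (Int × Int)) (d : PySem.Dict Int Int)
    (h : (d.items.map Prod.fst ++ l.map Prod.fst).Nodup) :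
    (l.foldl (fun (d : PySem.Dict Int Int) p => d.insert p.1 p.2) d).items = d.items ++ l := by
  induction l generalizing d with
  | nil => simp
  | cons p rest ih =>
      have hmem : p.1 ∉ d.items.map Prod.fst := by
        rw [List.nodup_append] at h
        intro hm
        exact h.2.2 p.1 hm p.1 (by simp) rfl
      have hcont : d.contains p.1 = false := by
        rw [Bool.eq_false_iff]
        intro hc
        rw [PySem.Dict.contains_iff_mem_keys] at hc
        have : d.keys = d.items.map Prod.fst := by cases d; rw [PySem.Dict.keys_mk]
        rw [this] at hc
        exact hmem hc
      have hins := PySem.Dict.items_insert_of_not_contains d p.2 hcont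
      simp only [List.foldl_cons]
      rw [ih (d.insert p.1 p.2) (by rw [hins]; simpa using h)]
      rw [hins]
      simp

theorem pvInterleave_append (xs ys : List Int) (a b : Int)
    (h : xs.length = ys.length) :
    pvInterleave (xs ++ [a]) (ys ++ [b]) = pvInterleave xs ys ++ [a, b] := by
  induction xs generalizing ys with
  | nil =>
      cases ys with
      | nil => rfl
      | cons y ys => simp at h
  | cons x xs ih =>
      cases ys with
      | nil => simp at h
      | cons y ys =>
          simp only [List.cons_append, pvInterleave]
          rw [ih ys (by simpa using h)]

theorem pvInterleave_map_range (n : Nat) (f h : Nat → Int) :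
    pvInterleave ((List.range n).map f) ((List.range n).map h)
      = (List.range n).flatMap (fun (i : Nat) => [f i, h i]) := by
  induction n with
  | zero => rfl
  | succ n ih =>
      rw [List.range_succ]
      simp only [List.map_append, List.map_cons, List.map_nil, List.flatMap_append]
      rw [pvInterleave_append _ _ _ _ (by simp), ih]
      simp

theorem pvM_length (g : Int) (k : Nat) : (pvM g k).length = 2 * k := by
  induction k with
  | zero => rfl
  | succ k ih => rw [pvM_succ]; simp [ih]; omega

theorem enumerate_pvM (g : Int) (k : Nat) :
    PySem.List.enumerate (pvM g k) 0 = pvS g k := by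
  induction k with
  | zero => simp [pvM, pvS]
  | succ k ih =>
      rw [pvM_succ, PySem.List.enumerate_append, ih, pvS_succ]
      congr 1
      rw [pvM_length]
      simp [PySem.List.enumerate_cons, PySem.List.enumerate_nil]

theorem swap_pvS (g : Int) (k : Nat) :
    (pvS g k).map Prod.swap = pvT g k := by
  simp [pvS, pvT, List.map_flatMap, Prod.swap]

-- evaluation of A's slice `ms0[:g]`
theorem evens_eval (n : Nat) :
    PySem.List.slice (PySem.List.pyRange 0 (2 * (n : Int)) 1) none (some (n : Int))
      = (List.range n).map (fun (k : Nat) => (k : Int)) := by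
  rw [PySem.List.slice_to _ (by positivity)]
  rw [PySem.List.pyRange_one_append 0 (n : Int) (2 * (n : Int)) (by positivity) (by omega)]
  have hlen : (PySem.List.pyRange 0 (n : Int) 1).length = (n : Int).toNat := by
    rw [PySem.List.length_pyRange_one]; simp
  rw [← hlen, List.take_left]
  rw [PySem.List.pyRange_one]
  simp

-- evaluation of A's slice `ms0[:g-1:-1]` (for nonnegative g = n)
theorem odds_eval (n : Nat) :
    PySem.List.slice? (PySem.List.pyRange 0 (2 * (n : Int)) 1) none (some ((n : Int) - 1)) (-1)
      = some ((List.range n).map (fun (k : Nat) => 2 * (n : Int) - 1 - (k : Int))) := by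
  have hlen : (PySem.List.pyRange 0 (2 * (n : Int)) 1).length = 2 * n := by
    rw [PySem.List.length_pyRange_one]; omega
  simp only [PySem.List.slice?, PySem.List.sliceIndices, hlen]
  norm_num
  rcases Nat.eq_zero_or_pos n with rfl | hn
  · simp
  · have hne : ¬ n = 0 := by omega
    have hmin : min ((n : Int) - 1) (2 * (n : Int) - 1) = (n : Int) - 1 := by
      apply min_eq_left; omega
    simp only [if_neg hne, hmin, if_pos hn]
    rw [if_pos (by omega : ((n : Int) - 1) < 2 * (n : Int) - 1)]
    have hcnt : (2 * (n : Int) - 1 - ((n : Int) - 1)).toNat = n := by omega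
    rw [hcnt]
    rw [show (fun (x : Nat) => some (max (2 * (n : Int) - 1 + -(x : Int)) 0))
          = some ∘ (fun (x : Nat) => max (2 * (n : Int) - 1 + -(x : Int)) 0) from rfl,
        List.filterMap_eq_map]
    apply List.map_congr_left
    intro x hx
    rw [List.mem_range] at hx
    have : (x : Int) < (n : Int) := by exact_mod_cast hx
    omega

theorem pvContains_mk_false (l : List (Int × Int)) (x : Int)
    (h : x ∉ l.map Prod.fst) : (PySem.Dict.mk l).contains x = false := by
  rw [Bool.eq_false_iff]
  intro hc
  rw [PySem.Dict.contains_iff_mem_keys, PySem.Dict.keys_mk] at hc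
  exact h hc

theorem pvInsert_mk (l : List (Int × Int)) (x v : Int) (h : x ∉ l.map Prod.fst) :
    (PySem.Dict.mk l).insert x v = PySem.Dict.mk (l ++ [(x, v)]) := by
  apply pvDict_eq
  rw [PySem.Dict.items_insert_of_not_contains _ _ (pvContains_mk_false l x h)]

-- B's fold, after processing the first k iterations, for group size g
theorem pvAltFold (g : Int) (k : Nat) (hk : (k : Int) ≤ g) :
    (PySem.List.pyRange 0 (k : Int) 1).foldl
      (fun (acc : PySem.Dict Int Int × PySem.Dict Int Int) i =>
        let lo := i
        let hi := 2 * g - 1 - i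
        ((acc.1.insert (2 * i) lo).insert (2 * i + 1) hi,
         (acc.2.insert lo (2 * i)).insert hi (2 * i + 1)))
      (PySem.Dict.mk [], PySem.Dict.mk [])
      = (PySem.Dict.mk (pvS g k), PySem.Dict.mk (pvT g k)) := by
  induction k with
  | zero =>
      rw [show ((0 : Nat) : Int) = 0 from rfl, PySem.List.pyRange_one_eq_nil le_rfl]
      simp [pvS, pvT]
  | succ k ih =>
      rw [show (((k : Nat) + 1 : Nat) : Int) = (k : Int) + 1 by push_cast; ring,
          PySem.List.pyRange_one_succ_right (by positivity), List.foldl_append,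
          ih (by push_cast at hk ⊢; omega)]
      simp only [List.foldl_cons, List.foldl_nil]
      have hk' : (k : Int) < g := by push_cast at hk; omega
      have m1 : 2 * (k : Int) ∉ (pvS g k).map Prod.fst := by
        rw [fst_pvS, PySem.List.mem_pyRange_one]; omega
      have m2 : 2 * (k : Int) + 1 ∉ (pvS g k ++ [(2 * (k : Int), (k : Int))]).map Prod.fst := by
        rw [List.map_append, List.mem_append, fst_pvS, PySem.List.mem_pyRange_one]
        rintro (h | h)
        · omega
        · simp at h
      have m3 : (k : Int) ∉ (pvT g k).map Prod.fst := by
        rw [mem_fst_pvT]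
        rintro ⟨i, hi, hx⟩
        have : (i : Int) < (k : Int) := by exact_mod_cast hi
        omega
      have m4 : 2 * g - 1 - (k : Int) ∉ (pvT g k ++ [((k : Int), 2 * (k : Int))]).map Prod.fst := by
        rw [List.map_append, List.mem_append]
        rintro (hx | hx)
        · rw [mem_fst_pvT] at hx
          obtain ⟨i, hi, hx⟩ := hx
          have : (i : Int) < (k : Int) := by exact_mod_cast hi
          omega
        · simp at hx
          omega
      rw [pvInsert_mk _ _ _ m1, pvInsert_mk _ _ _ m2, pvInsert_mk _ _ _ m3,
          pvInsert_mk _ _ _ m4, pvS_succ, pvT_succ]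
      simp

-- A's result, for a nonnegative group size n
theorem pvA_eval (n : Nat) :
    get_seq_to_zigzag_minishard_maps_py ((n : Int)) = (pvS ((n : Int)) n, pvT ((n : Int)) n) := by
  unfold get_seq_to_zigzag_minishard_maps_py
  have hM : pvInterleave
      (PySem.List.slice (PySem.List.pyRange 0 (2 * (n : Int)) 1) none (some ((n : Int))))
      ((PySem.List.slice? (PySem.List.pyRange 0 (2 * (n : Int)) 1) none
          (some ((n : Int) - 1)) (-1)).getD [])
      = pvM ((n : Int)) n := by
    rw [evens_eval, odds_eval, Option.getD_some, pvInterleave_map_range]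
    rfl
  simp only [hM]
  have hS : (PySem.List.enumerate (pvM ((n : Int)) n) 0).foldl
      (fun (d : PySem.Dict Int Int) p => d.insert p.1 p.2) (PySem.Dict.mk [])
      = PySem.Dict.mk (pvS ((n : Int)) n) := by
    apply pvDict_eq
    rw [enumerate_pvM, pvFoldInsert]
    · rfl
    · simp only [fst_pvS]
      simpa using PySem.List.nodup_pyRange_one _ _
  simp only [hS]
  have hT : (pvS ((n : Int)) n).foldl
      (fun (d : PySem.Dict Int Int) p => d.insert p.2 p.1) (PySem.Dict.mk [])
      = PySem.Dict.mk (pvT ((n : Int)) n) := by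
    apply pvDict_eq
    have hswap : (pvS ((n : Int)) n).foldl
        (fun (d : PySem.Dict Int Int) p => d.insert p.2 p.1) (PySem.Dict.mk [])
        = ((pvS ((n : Int)) n).map Prod.swap).foldl
            (fun (d : PySem.Dict Int Int) p => d.insert p.1 p.2) (PySem.Dict.mk []) := by
      rw [List.foldl_map]
      rfl
    rw [hswap, swap_pvS, pvFoldInsert]
    · rfl
    · simpa using nodup_fst_pvT ((n : Int)) n le_rfl
  simp only [hT]

-- B's result, for a nonnegative group size n
theorem pvB_eval (n : Nat) :
    get_seq_to_zigzag_minishard_maps_py_alt ((n : Int)) = (pvS ((n : Int)) n, pvT ((n : Int)) n) := by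
  unfold get_seq_to_zigzag_minishard_maps_py_alt
  rw [pvAltFold ((n : Int)) n le_rfl]

-- both ports collapse for group_size < 0
theorem pvA_neg (g : Int) (hg : g < 0) :
    get_seq_to_zigzag_minishard_maps_py g = ([], []) := by
  unfold get_seq_to_zigzag_minishard_maps_py
  rw [PySem.List.pyRange_one_eq_nil (by omega)]
  simp [PySem.List.slice, PySem.List.slice?, PySem.List.sliceIndices,
    PySem.List.enumerate_nil, pvInterleave]

theorem pvB_neg (g : Int) (hg : g < 0) :
    get_seq_to_zigzag_minishard_maps_py_alt g = ([], []) := by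
  unfold get_seq_to_zigzag_minishard_maps_py_alt
  rw [PySem.List.pyRange_one_eq_nil (by omega)]
  rfl

-- ===== VERDICT (by name: the statement is the Claim_ definition above) =====
theorem get_seq_to_zigzag_minishard_maps_py_spec : Claim_equal_get_seq_to_zigzag_minishard_maps_py := by
  intro g _
  unfold Spec_get_seq_to_zigzag_minishard_maps_py
  by_cases hg : 0 ≤ g
  · obtain ⟨n, rfl⟩ : ∃ n : Nat, g = (n : Int) := ⟨g.toNat, (Int.toNat_of_nonneg hg).symm⟩
    rw [pvA_eval n, pvB_eval n]
  · have hg' : g < 0 := by omega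
    rw [pvA_neg g hg', pvB_neg g hg']
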